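-- pv_equiv track=rewrite | github.com/traxon99/maze_controller | epuck_go_forward/epuck_go_forward.py | compress_differences
-- ===== SOURCE A (Python) =====
-- def compress_differences(differences):
--     if not differences:
--         return []
--
--     compressed = []
--     current = differences[0]
--     count = 1
--
--     for diff in differences[1:]:
--         if diff == current:
--             count += 1
--         else:
--             compressed.append((current[0], current[1], count))
--             current = diff
--             count = 1
--
--     compressed.append((current[0], current[1], count))
--     return compressed
-- ===== SOURCE B (Python) =====
-- def compress_differences(differences):
--     n = len(differences)
--     # stage 1: indices where a new run starts
--     starts = [i for i in range(n) if i == 0 or differences[i] != differences[i - 1]]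
--     # stage 2: consecutive boundaries give each run's extent
--     return [(differences[s][0], differences[s][1], e - s)
--             for s, e in zip(starts, starts[1:] + [n])]
-- ===== Notes on version B (the rewrite author's own statement) =====
-- stated objective: alternative
-- what changed: Replaces the single-pass current/count accumulator loop with a two-stage index computation: first collect the start indices of runs by comparing each element with its predecessor, then emit (x, y, end - start) from consecutive boundary pairs.
import Mathlib
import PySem

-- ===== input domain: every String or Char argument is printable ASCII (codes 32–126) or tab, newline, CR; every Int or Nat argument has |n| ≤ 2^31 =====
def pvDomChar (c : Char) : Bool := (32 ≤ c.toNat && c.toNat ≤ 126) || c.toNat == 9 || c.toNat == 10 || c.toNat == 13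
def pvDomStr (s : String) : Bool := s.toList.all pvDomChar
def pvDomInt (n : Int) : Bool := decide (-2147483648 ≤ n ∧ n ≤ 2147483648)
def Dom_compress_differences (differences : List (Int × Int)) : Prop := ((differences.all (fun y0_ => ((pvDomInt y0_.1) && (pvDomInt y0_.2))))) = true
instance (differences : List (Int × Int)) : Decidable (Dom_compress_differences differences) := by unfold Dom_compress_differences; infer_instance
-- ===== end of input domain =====

-- B replaces A's single-pass current/count accumulator with a two-stage index
-- computation (run-start boundaries, then end-start lengths); same O(n) cost,
-- return value proved equal.

-- ===== PORT A =====
-- A's loop over differences[1:] with state (compressed, current, count), then a final append.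
def compress_differences (differences : List (Int × Int)) : List (Int × Int × Int) :=
  match differences with
  | [] => []
  | d :: rest =>
    let st := rest.foldl
      (fun (s : List (Int × Int × Int) × (Int × Int) × Int) diff =>
        if diff == s.2.1 then (s.1, s.2.1, s.2.2 + 1)
        else (s.1 ++ [(s.2.1.1, s.2.1.2, s.2.2)], diff, 1))
      ([], d, 1)
    st.1 ++ [(st.2.1.1, st.2.1.2, st.2.2)]

-- ===== PORT B =====
-- Stage 1 of Source B: the list comprehension collecting run-start indices
-- [i for i in range(n) if i == 0 or differences[i] != differences[i-1]]
-- (indices are always in range, so differences[i] is List.getD).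
def bStarts (l : List (Int × Int)) : List Nat :=
  (List.range l.length).filter
    (fun i => i == 0 || !(l.getD i (0, 0) == l.getD (i - 1) (0, 0)))

-- Stage 2: zip consecutive boundaries and emit (x, y, e - s).
def compress_differences_alt (differences : List (Int × Int)) : List (Int × Int × Int) :=
  let n := differences.length
  let starts := bStarts differences
  (starts.zip (starts.drop 1 ++ [n])).map
    (fun p => ((differences.getD p.1 (0, 0)).1, (differences.getD p.1 (0, 0)).2,
               (p.2 : Int) - (p.1 : Int)))

-- ===== PRECONDITION & SPEC =====
def Spec_compress_differences (differences : List (Int × Int)) (out : List (Int × Int × Int)) : Prop := out = compress_differences_alt differences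
instance (differences : List (Int × Int)) (out : List (Int × Int × Int)) : Decidable (Spec_compress_differences differences out) := by unfold Spec_compress_differences; infer_instance

-- ===== CLAIM (what is proved, stated in full; the proofs are below) =====
def Claim_equal_compress_differences : Prop := ∀ (differences : List (Int × Int)), Dom_compress_differences differences → Spec_compress_differences differences (compress_differences differences)

-- ===== LEMMAS AND PROOFS =====

-- Proof-side reference: recursive run-length encoding; both ports are proved equal to it.
def rleRef (differences : List (Int × Int)) : List (Int × Int × Int) :=
  match differences with
  | [] => []
  | d :: rest =>
    (d.1, d.2, 1 + ((rest.takeWhile (· == d)).length : Int)) ::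
      rleRef (rest.dropWhile (· == d))
termination_by differences.length
decreasing_by
  simp only [List.length_cons]
  exact Nat.lt_succ_of_le (List.length_dropWhile_le _ _)

-- Invariant of A's loop: starting from (acc, d, c) with count c, the loop finishes the
-- current run (its length is c + takeWhile length) and then behaves like rleRef on the rest.
theorem compress_fold_eq (l : List (Int × Int)) :
    ∀ (acc : List (Int × Int × Int)) (d : Int × Int) (c : Int),
    ((l.foldl
        (fun (s : List (Int × Int × Int) × (Int × Int) × Int) diff =>
          if diff == s.2.1 then (s.1, s.2.1, s.2.2 + 1)
          else (s.1 ++ [(s.2.1.1, s.2.1.2, s.2.2)], diff, 1))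
        (acc, d, c)).1 ++
      [((l.foldl
        (fun (s : List (Int × Int × Int) × (Int × Int) × Int) diff =>
          if diff == s.2.1 then (s.1, s.2.1, s.2.2 + 1)
          else (s.1 ++ [(s.2.1.1, s.2.1.2, s.2.2)], diff, 1))
        (acc, d, c)).2.1.1,
        (l.foldl
        (fun (s : List (Int × Int × Int) × (Int × Int) × Int) diff =>
          if diff == s.2.1 then (s.1, s.2.1, s.2.2 + 1)
          else (s.1 ++ [(s.2.1.1, s.2.1.2, s.2.2)], diff, 1))
        (acc, d, c)).2.1.2,
        (l.foldl
        (fun (s : List (Int × Int × Int) × (Int × Int) × Int) diff =>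
          if diff == s.2.1 then (s.1, s.2.1, s.2.2 + 1)
          else (s.1 ++ [(s.2.1.1, s.2.1.2, s.2.2)], diff, 1))
        (acc, d, c)).2.2)])
    = acc ++ (d.1, d.2, c + ((l.takeWhile (· == d)).length : Int)) ::
        rleRef (l.dropWhile (· == d)) := by
  induction l with
  | nil => intro acc d c; simp [rleRef]
  | cons x xs ih =>
    intro acc d c
    by_cases hx : x == d
    · have hxd : x = d := eq_of_beq hx
      subst hxd
      simp only [List.foldl_cons, List.takeWhile_cons, List.dropWhile_cons,
        BEq.rfl, if_pos, List.length_cons]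
      rw [ih acc x (c + 1)]
      congr 3
      push_cast
      ring_nf
    · simp only [List.foldl_cons, List.takeWhile_cons, List.dropWhile_cons, hx]
      rw [if_neg (by simp [hx]), if_neg (by simp [hx]), if_neg (by simp [hx])]
      have := ih (acc ++ [(d.1, d.2, c)]) x 1
      simp only at this ⊢
      rw [this]
      rw [rleRef]
      simp

theorem a_eq_ref (l : List (Int × Int)) : compress_differences l = rleRef l := by
  cases l with
  | nil => simp [compress_differences, rleRef]
  | cons d rest =>
    rw [compress_differences]
    have := compress_fold_eq rest [] d 1
    simp only at this
    rw [rleRef]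
    simpa using this

-- start indices of a list headed by a run of k+1 copies of d
theorem filter_range_single (p : Nat → Bool) (k : Nat) (h0 : p 0 = true)
    (h : ∀ i, 0 < i → i < k + 1 → p i = false) :
    (List.range (k + 1)).filter p = [0] := by
  induction k with
  | zero => simp [List.range_succ, h0]
  | succ k ih =>
    rw [List.range_succ, List.filter_append]
    rw [ih (fun i hi hik => h i hi (by omega))]
    simp [h (k + 1) (by omega) (by omega)]

theorem run_getD_left (k : Nat) (d : Int × Int) (r : List (Int × Int))
    (i : Nat) (hi : i < k + 1) :
    (List.replicate (k + 1) d ++ r).getD i (0, 0) = d := by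
  rw [List.getD_append _ _ _ _ (by simpa using hi)]
  simp [List.getD_eq_getElem?_getD, List.getElem?_replicate, hi]

theorem run_getD_right (k : Nat) (d : Int × Int) (r : List (Int × Int)) (j : Nat) :
    (List.replicate (k + 1) d ++ r).getD (k + 1 + j) (0, 0) = r.getD j (0, 0) := by
  rw [List.getD_append_right _ _ _ _ (by simp)]
  simp

theorem bStarts_run (k : Nat) (d : Int × Int) (r : List (Int × Int))
    (hr : ∀ x ∈ r.head?, ¬ x = d) :
    bStarts (List.replicate (k + 1) d ++ r)
      = 0 :: (bStarts r).map (k + 1 + ·) := by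
  unfold bStarts
  rw [List.length_append, List.length_replicate, List.range_add, List.filter_append]
  rw [filter_range_single _ k (by simp)
      (fun i hi hik => by
        simp only [run_getD_left k d r i hik, run_getD_left k d r (i - 1) (by omega)]
        simp
        omega)]
  rw [List.filter_map, List.filter_congr (q := fun j =>
        j == 0 || !(r.getD j (0, 0) == r.getD (j - 1) (0, 0)))
      (by
        intro j hj
        simp only [List.mem_range] at hj
        simp only [Function.comp_apply]
        cases j with
        | zero =>
          cases r with
          | nil => simp at hj
          | cons x r' =>
            have hx : ¬ x = d := hr x rfl
            have eA : (List.replicate (k + 1) d ++ x :: r').getD (k + 1 + 0) (0, 0) = x := by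
              simpa using run_getD_right k d (x :: r') 0
            have eB : (List.replicate (k + 1) d ++ x :: r').getD (k + 1 + 0 - 1) (0, 0) = d := by
              rw [show k + 1 + 0 - 1 = k from by omega]
              exact run_getD_left k d (x :: r') k (by omega)
            have hxb : (x == d) = false := by simpa using hx
            simp only [eA, eB]
            simp [hxb]
        | succ j' =>
          have h1 : k + 1 + (j' + 1) - 1 = k + 1 + j' := by omega
          have h2 : j' + 1 - 1 = j' := by omega
          rw [h1, h2, run_getD_right k d r (j' + 1), run_getD_right k d r j']
          simp)]
  simp

theorem bStarts_cons_head (x : Int × Int) (r' : List (Int × Int)) :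
    bStarts (x :: r') = 0 :: (bStarts (x :: r')).tail := by
  unfold bStarts
  rw [show (x :: r').length = r'.length + 1 from rfl, List.range_succ_eq_map,
    List.filter_cons]
  simp

theorem zip_peel (m0 : Nat) (M' : List Nat) (n : Nat) :
    (0 :: m0 :: M').zip ((0 :: m0 :: M').drop 1 ++ [n])
      = (0, m0) :: ((m0 :: M').zip ((m0 :: M').drop 1 ++ [n])) := rfl

theorem zip_succ_shift (k : Nat) (G G' : Nat × Nat → Int × Int × Int)
    (hG : ∀ s e : Nat, G (k + 1 + s, k + 1 + e) = G' (s, e)) (A : List Nat) (L : Nat) :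
    List.map G ((A.map (fun x => k + 1 + x)).zip
        ((A.map (fun x => k + 1 + x)).drop 1 ++ [k + 1 + L]))
      = List.map G' (A.zip (A.drop 1 ++ [L])) := by
  rw [show (A.map (fun x => k + 1 + x)).drop 1 = (A.drop 1).map (fun x => k + 1 + x) by
      simp]
  rw [show ((A.drop 1).map (fun x => k + 1 + x)) ++ [k + 1 + L]
        = (A.drop 1 ++ [L]).map (fun x => k + 1 + x) by simp]
  rw [List.zip_map, List.map_map]
  apply List.map_congr_left
  intro p _
  cases p with
  | mk s e => exact hG s e

theorem alt_run (k : Nat) (d : Int × Int) (r : List (Int × Int))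
    (hr : ∀ x ∈ r.head?, ¬ x = d) :
    compress_differences_alt (List.replicate (k + 1) d ++ r)
      = (d.1, d.2, (k : Int) + 1) :: compress_differences_alt r := by
  have hl0 : (List.replicate (k + 1) d ++ r).getD 0 (0, 0) = d :=
    run_getD_left k d r 0 (by omega)
  cases r with
  | nil =>
    simp only [compress_differences_alt]
    rw [bStarts_run k d [] (by simp)]
    simp only [bStarts, List.length_nil, List.range_zero, List.filter_nil,
      List.map_nil, List.drop_succ_cons, List.drop_nil, List.nil_append,
      List.zip_cons_cons, List.zip_nil_left, List.map_cons, List.map_nil,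
      List.length_append, List.length_replicate, hl0]
    norm_num
  | cons x r' =>
    simp only [compress_differences_alt]
    rw [bStarts_run k d (x :: r') hr, bStarts_cons_head x r']
    have hn : (List.replicate (k + 1) d ++ x :: r').length
        = k + 1 + (x :: r').length := by simp
    rw [hn]
    generalize (bStarts (x :: r')).tail = T
    have hG : ∀ s e : Nat,
        (fun p : Nat × Nat =>
          (((List.replicate (k + 1) d ++ x :: r').getD p.1 (0, 0)).1,
           ((List.replicate (k + 1) d ++ x :: r').getD p.1 (0, 0)).2,
           (p.2 : Int) - (p.1 : Int))) (k + 1 + s, k + 1 + e)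
        = (fun p : Nat × Nat =>
          (((x :: r').getD p.1 (0, 0)).1, ((x :: r').getD p.1 (0, 0)).2,
           (p.2 : Int) - (p.1 : Int))) (s, e) := by
      intro s e
      simp only [run_getD_right k d (x :: r') s]
      simp only [Prod.mk.injEq, true_and]
      push_cast
      ring
    simp only [List.map_cons]
    rw [zip_peel, show (k + 1 + 0) :: List.map (fun x => k + 1 + x) T
          = (0 :: T).map (fun x => k + 1 + x) from rfl]
    rw [List.map_cons]
    rw [zip_succ_shift k
      (fun p : Nat × Nat =>
        (((List.replicate (k + 1) d ++ x :: r').getD p.1 (0, 0)).1,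
         ((List.replicate (k + 1) d ++ x :: r').getD p.1 (0, 0)).2,
         (p.2 : Int) - (p.1 : Int)))
      (fun p : Nat × Nat =>
        (((x :: r').getD p.1 (0, 0)).1, ((x :: r').getD p.1 (0, 0)).2,
         (p.2 : Int) - (p.1 : Int)))
      hG (0 :: T) (x :: r').length]
    congr 1

theorem head_dropWhile_false {α : Type} (p : α → Bool) :
    ∀ (l : List α) (x : α) (t : List α), l.dropWhile p = x :: t → p x = false := by
  intro l
  induction l with
  | nil => intro x t h; simp [List.dropWhile] at h
  | cons a l ih =>
    intro x t h
    rw [List.dropWhile_cons] at h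
    by_cases ha : p a
    · rw [if_pos ha] at h; exact ih x t h
    · rw [if_neg ha] at h
      cases h; simpa using ha

theorem alt_eq_ref (l : List (Int × Int)) : compress_differences_alt l = rleRef l := by
  induction l using rleRef.induct with
  | case1 =>
    rw [rleRef]
    simp [compress_differences_alt, bStarts]
  | case2 d rest ih =>
    have hsplit : rest = rest.takeWhile (· == d) ++ rest.dropWhile (· == d) :=
      (List.takeWhile_append_dropWhile).symm
    have hrep : rest.takeWhile (· == d)
        = List.replicate (rest.takeWhile (· == d)).length d := by
      apply List.eq_replicate_length.mpr
      intro b hb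
      have hbp := List.mem_takeWhile_imp (p := fun x => x == d) hb
      exact eq_of_beq hbp
    have hl : d :: rest
        = List.replicate ((rest.takeWhile (· == d)).length + 1) d
            ++ rest.dropWhile (· == d) := by
      rw [List.replicate_succ, List.cons_append]
      conv_lhs => rw [hsplit]
      rw [← hrep]
    have hr : ∀ x ∈ (rest.dropWhile (· == d)).head?, ¬ x = d := by
      intro x hx
      cases hdw : rest.dropWhile (· == d) with
      | nil => rw [hdw] at hx; simp at hx
      | cons y t =>
        rw [hdw] at hx
        simp at hx
        subst hx
        have := head_dropWhile_false (· == d) rest y t hdw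
        simp at this
        exact this
    calc compress_differences_alt (d :: rest)
        = compress_differences_alt
            (List.replicate ((rest.takeWhile (· == d)).length + 1) d
              ++ rest.dropWhile (· == d)) := by rw [← hl]
      _ = (d.1, d.2, ((rest.takeWhile (· == d)).length : Int) + 1)
            :: compress_differences_alt (rest.dropWhile (· == d)) :=
          alt_run _ d _ hr
      _ = (d.1, d.2, ((rest.takeWhile (· == d)).length : Int) + 1)
            :: rleRef (rest.dropWhile (· == d)) := by rw [ih]
      _ = rleRef (d :: rest) := by
          rw [rleRef, Int.add_comm 1 ((rest.takeWhile (· == d)).length : Int)]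


-- ===== VERDICT (by name: the statement is the Claim_ definition above) =====
theorem compress_differences_spec : Claim_equal_compress_differences := by
  intro differences _
  unfold Spec_compress_differences
  rw [a_eq_ref, alt_eq_ref]
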